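-- pv_equiv track=rewrite | github.com/rongithubs/witb | witb-backend/services/ebay_service.py | _categorize_golf_item
-- ===== SOURCE A (Python) =====
-- def _categorize_golf_item(title: str) -> str | None:
--     """Categorize golf equipment based on title."""
--     title_upper = title.upper()
--
--     if any(word in title_upper for word in ["DRIVER", "1 WOOD"]):
--         return "Driver"
--     elif any(word in title_upper for word in ["WOOD", "3W", "5W", "7W"]):
--         return "Wood"
--     elif any(word in title_upper for word in ["HYBRID", "RESCUE", "UTILITY"]):
--         return "Hybrid"
--     elif any(word in title_upper for word in ["IRON", "IRONS"]) and not any(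
--         word in title_upper for word in ["WEDGE"]
--     ):
--         return "Iron"
--     elif any(word in title_upper for word in ["WEDGE", "SW", "PW", "GW", "LW"]):
--         return "Wedge"
--     elif "PUTTER" in title_upper:
--         return "Putter"
--     elif any(word in title_upper for word in ["BALL", "GOLF BALL"]):
--         return "Ball"
--
--     return "Golf Equipment"
-- ===== SOURCE B (Python) =====
-- # Single left-to-right scan over the uppercased title collecting every keyword
-- # that occurs (checking which keywords start at each position), then one
-- # priority resolution over the found-set.  "IRONS" and "GOLF BALL" are dropped
-- # from the keyword list because any title containing them contains "IRON" /
-- # "BALL" as substrings anyway.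
-- _KEYWORDS = ("DRIVER", "1 WOOD", "WOOD", "3W", "5W", "7W", "HYBRID", "RESCUE",
--              "UTILITY", "IRON", "WEDGE", "SW", "PW", "GW", "LW", "PUTTER", "BALL")
--
--
-- def _categorize_golf_item(title: str) -> str | None:
--     """Categorize golf equipment based on title (scan once, then resolve)."""
--     t = title.upper()
--     found = set()
--     for i in range(len(t) + 1):
--         for kw in _KEYWORDS:
--             if t.startswith(kw, i):
--                 found.add(kw)
--     if "DRIVER" in found or "1 WOOD" in found:
--         return "Driver"
--     if "WOOD" in found or "3W" in found or "5W" in found or "7W" in found: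
--         return "Wood"
--     if "HYBRID" in found or "RESCUE" in found or "UTILITY" in found:
--         return "Hybrid"
--     if "IRON" in found and "WEDGE" not in found:
--         return "Iron"
--     if "WEDGE" in found or "SW" in found or "PW" in found or "GW" in found or "LW" in found:
--         return "Wedge"
--     if "PUTTER" in found:
--         return "Putter"
--     if "BALL" in found:
--         return "Ball"
--     return "Golf Equipment"
-- ===== Notes on version B (the rewrite author's own statement) =====
-- stated objective: alternative
-- what changed: B makes a single left-to-right scan of the uppercased title, collecting into a set every keyword that starts at each position (dropping the redundant 'IRONS' and 'GOLF BALL', which are subsumed by 'IRON'/'BALL'), and then resolves the category by one priority pass over the found-set, instead of A's per-branch substring-membership cascade.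
import Mathlib
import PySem

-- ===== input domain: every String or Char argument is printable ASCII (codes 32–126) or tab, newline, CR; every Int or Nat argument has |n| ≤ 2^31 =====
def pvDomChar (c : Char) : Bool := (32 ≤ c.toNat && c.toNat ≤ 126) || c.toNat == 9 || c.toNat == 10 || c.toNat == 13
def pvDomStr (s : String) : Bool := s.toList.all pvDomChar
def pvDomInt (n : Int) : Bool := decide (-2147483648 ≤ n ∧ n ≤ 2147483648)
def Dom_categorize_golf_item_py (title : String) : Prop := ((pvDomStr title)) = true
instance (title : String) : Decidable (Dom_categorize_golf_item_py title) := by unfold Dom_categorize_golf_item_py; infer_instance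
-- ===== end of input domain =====

-- B scans the uppercased title once, collecting every keyword that starts at each
-- position into a set, then resolves the category by one priority pass (alternative
-- algorithm of similar cost); return values are equal everywhere.

-- ===== PORT A =====
def categorize_golf_item_py (title : String) : Option String :=
  let title_upper := PySem.Str.upper title
  if ["DRIVER", "1 WOOD"].any (fun word => PySem.Str.isIn word title_upper) then
    some "Driver"
  else if ["WOOD", "3W", "5W", "7W"].any (fun word => PySem.Str.isIn word title_upper) then
    some "Wood"
  else if ["HYBRID", "RESCUE", "UTILITY"].any (fun word => PySem.Str.isIn word title_upper) then
    some "Hybrid"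
  else if ["IRON", "IRONS"].any (fun word => PySem.Str.isIn word title_upper)
      && !(["WEDGE"].any (fun word => PySem.Str.isIn word title_upper)) then
    some "Iron"
  else if ["WEDGE", "SW", "PW", "GW", "LW"].any (fun word => PySem.Str.isIn word title_upper) then
    some "Wedge"
  else if PySem.Str.isIn "PUTTER" title_upper then
    some "Putter"
  else if ["BALL", "GOLF BALL"].any (fun word => PySem.Str.isIn word title_upper) then
    some "Ball"
  else
    some "Golf Equipment"

-- ===== PORT B =====
def pvKeywords : List String :=
  ["DRIVER", "1 WOOD", "WOOD", "3W", "5W", "7W", "HYBRID", "RESCUE",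
   "UTILITY", "IRON", "WEDGE", "SW", "PW", "GW", "LW", "PUTTER", "BALL"]

-- the scan: for i in range(len(t)+1): for kw in _KEYWORDS: if t.startswith(kw, i): found.add(kw)
def pvFound (t : List Char) : PySem.Set String :=
  (PySem.List.pyRange 0 ((t.length : Int) + 1) 1).foldl
    (fun s i => pvKeywords.foldl
      (fun s kw => if PySem.Chars.startswith (t.drop i.toNat) kw.toList then PySem.Set.add s kw else s) s)
    PySem.Set.empty

def categorize_golf_item_py_alt (title : String) : Option String :=
  let t := (PySem.Str.upper title).toList
  let found := pvFound t
  if PySem.Set.contains found "DRIVER" || PySem.Set.contains found "1 WOOD" then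
    some "Driver"
  else if PySem.Set.contains found "WOOD" || PySem.Set.contains found "3W"
      || PySem.Set.contains found "5W" || PySem.Set.contains found "7W" then
    some "Wood"
  else if PySem.Set.contains found "HYBRID" || PySem.Set.contains found "RESCUE"
      || PySem.Set.contains found "UTILITY" then
    some "Hybrid"
  else if PySem.Set.contains found "IRON" && !(PySem.Set.contains found "WEDGE") then
    some "Iron"
  else if PySem.Set.contains found "WEDGE" || PySem.Set.contains found "SW"
      || PySem.Set.contains found "PW" || PySem.Set.contains found "GW"
      || PySem.Set.contains found "LW" then
    some "Wedge"
  else if PySem.Set.contains found "PUTTER" then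
    some "Putter"
  else if PySem.Set.contains found "BALL" then
    some "Ball"
  else
    some "Golf Equipment"

-- ===== PRECONDITION & SPEC =====
def Spec_categorize_golf_item_py (title : String) (out : Option String) : Prop := out = categorize_golf_item_py_alt title
instance (title : String) (out : Option String) : Decidable (Spec_categorize_golf_item_py title out) := by unfold Spec_categorize_golf_item_py; infer_instance

-- ===== CLAIM (what is proved, stated in full; the proofs are below) =====
def Claim_equal_categorize_golf_item_py : Prop := ∀ (title : String), Dom_categorize_golf_item_py title → Spec_categorize_golf_item_py title (categorize_golf_item_py title)

-- ===== LEMMAS AND PROOFS =====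

-- membership after the inner fold over the keyword list
lemma mem_inner_fold (l : List String) (s : PySem.Set String) (p : String → Bool) (x : String) :
    x ∈ l.foldl (fun s kw => if p kw then PySem.Set.add s kw else s) s ↔
      x ∈ s ∨ (x ∈ l ∧ p x = true) := by
  induction l generalizing s with
  | nil => simp
  | cons hd tl ih =>
    simp only [List.foldl_cons, ih, List.mem_cons]
    by_cases h : p hd
    · simp [h, PySem.Set.mem_add]
      constructor
      · rintro ((hx | rfl) | h2)
        · exact Or.inl hx
        · exact Or.inr ⟨Or.inl rfl, h⟩
        · exact Or.inr ⟨Or.inr h2.1, h2.2⟩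
      · rintro (hx | ⟨(rfl | hmem), hp⟩)
        · exact Or.inl (Or.inl hx)
        · exact Or.inl (Or.inr rfl)
        · exact Or.inr ⟨hmem, hp⟩
    · simp only [h, Bool.false_eq_true]
      constructor
      · rintro (hx | h2)
        · exact Or.inl hx
        · exact Or.inr ⟨Or.inr h2.1, h2.2⟩
      · rintro (hx | ⟨(rfl | hmem), hp⟩)
        · exact Or.inl hx
        · exact absurd hp h
        · exact Or.inr ⟨hmem, hp⟩

-- membership after the outer fold over the positions
lemma mem_outer_fold (is : List Int) (s : PySem.Set String) (q : Int → String → Bool) (x : String) :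
    x ∈ is.foldl (fun s i => pvKeywords.foldl
        (fun s kw => if q i kw then PySem.Set.add s kw else s) s) s ↔
      x ∈ s ∨ ∃ i ∈ is, x ∈ pvKeywords ∧ q i x = true := by
  induction is generalizing s with
  | nil => simp
  | cons hd tl ih =>
    simp only [List.foldl_cons, ih, mem_inner_fold, List.mem_cons]
    constructor
    · rintro ((hx | h1) | ⟨i, hi, h2⟩)
      · exact Or.inl hx
      · exact Or.inr ⟨hd, Or.inl rfl, h1⟩
      · exact Or.inr ⟨i, Or.inr hi, h2⟩
    · rintro (hx | ⟨i, (rfl | hi), h2⟩)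
      · exact Or.inl (Or.inl hx)
      · exact Or.inl (Or.inr h2)
      · exact Or.inr ⟨i, hi, h2⟩

-- the scan finds exactly the keywords occurring as substrings (nonempty keywords)
lemma contains_pvFound (t : List Char) (kw : String) (hmem : kw ∈ pvKeywords)
    (hne : kw.toList ≠ []) :
    PySem.Set.contains (pvFound t) kw = PySem.Chars.isIn kw.toList t := by
  have hiff : kw ∈ pvFound t ↔ PySem.Chars.isIn kw.toList t = true := by
    unfold pvFound
    rw [mem_outer_fold]
    simp only [PySem.Set.empty, List.not_mem_nil, false_or]
    rw [← PySem.Chars.exists_prefix_drop_iff_isIn]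
    constructor
    · rintro ⟨i, hi, -, hsw⟩
      exact ⟨i.toNat, (PySem.Chars.startswith_iff _ _).mp hsw⟩
    · rintro ⟨j, hpre⟩
      have hj : j ≤ t.length := by
        by_contra hgt
        rw [not_le] at hgt
        rw [List.drop_eq_nil_of_le (le_of_lt hgt)] at hpre
        exact hne (List.prefix_nil.mp hpre)
      refine ⟨(j : Int), ?_, hmem, ?_⟩
      · rw [PySem.List.mem_pyRange_one]
        constructor
        · exact Int.natCast_nonneg j
        · exact_mod_cast Nat.lt_succ_of_le hj
      · rw [Int.toNat_natCast]
        exact (PySem.Chars.startswith_iff _ _).mpr hpre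
  rcases h : PySem.Chars.isIn kw.toList t with _ | _
  · simp only [PySem.Set.contains]
    rw [List.contains_eq_mem]
    simp only [decide_eq_false_iff_not]
    · intro hmem'
      rw [h] at hiff
      simp at hiff
      exact hiff hmem'
  · simp only [PySem.Set.contains]
    rw [List.contains_eq_mem]
    simp only [decide_eq_true_eq]
    exact hiff.mpr h

-- a substring of a found substring is found: IRONS ⇒ IRON, GOLF BALL ⇒ BALL
lemma isIn_of_infix_isIn (a b : List Char) (t : List Char) (hab : a <:+: b)
    (h : PySem.Chars.isIn b t = true) : PySem.Chars.isIn a t = true :=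
  (PySem.Chars.isIn_iff_infix _ _).mpr
    (hab.trans ((PySem.Chars.isIn_iff_infix _ _).mp h))

lemma or_absorb_isIn (a b : List Char) (t : List Char) (hab : a <:+: b) :
    (PySem.Chars.isIn a t || PySem.Chars.isIn b t) = PySem.Chars.isIn a t := by
  rcases h : PySem.Chars.isIn b t with _ | _
  · simp
  · simp [isIn_of_infix_isIn a b t hab h]

-- ===== VERDICT (by name: the statement is the Claim_ definition above) =====
theorem categorize_golf_item_py_spec : Claim_equal_categorize_golf_item_py := by
  intro title _
  unfold Spec_categorize_golf_item_py categorize_golf_item_py categorize_golf_item_py_alt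
  simp only [List.any_cons, List.any_nil, Bool.or_false, PySem.Str.isIn_eq]
  rw [contains_pvFound _ _ (by decide) (by decide),
      contains_pvFound _ _ (by decide) (by decide),
      contains_pvFound _ _ (by decide) (by decide),
      contains_pvFound _ _ (by decide) (by decide),
      contains_pvFound _ _ (by decide) (by decide),
      contains_pvFound _ _ (by decide) (by decide),
      contains_pvFound _ _ (by decide) (by decide),
      contains_pvFound _ _ (by decide) (by decide),
      contains_pvFound _ _ (by decide) (by decide),
      contains_pvFound _ _ (by decide) (by decide),
      contains_pvFound _ _ (by decide) (by decide),
      contains_pvFound _ _ (by decide) (by decide),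
      contains_pvFound _ _ (by decide) (by decide),
      contains_pvFound _ _ (by decide) (by decide),
      contains_pvFound _ _ (by decide) (by decide),
      contains_pvFound _ _ (by decide) (by decide),
      contains_pvFound _ _ (by decide) (by decide)]
  rw [or_absorb_isIn "IRON".toList "IRONS".toList _ (by decide),
      or_absorb_isIn "BALL".toList "GOLF BALL".toList _ (by decide)]
  simp only [Bool.or_assoc]
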